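-- pv_equiv track=rewrite | github.com/devcode8/multi-document-summarization | workflow_prototype.py | reduce_summary
-- ===== SOURCE A (Python) =====
-- from typing import List, Dict, Tuple
--
-- def reduce_summary(summaries: List[str], max_sentences_per_doc: int = 4) -> str:
--     """
--     Step 5: Final summary reduction by removing subset sentences and limiting length
--     """
--     all_sentences = []
--
--     # Collect all sentences from all summaries
--     for summary in summaries:
--         if summary:
--             sentences = [s.strip() for s in summary.split('.') if s.strip()]
--             all_sentences.extend(sentences)
--
--     # Remove subset sentences
--     filtered_sentences = []
--     for i, sent1 in enumerate(all_sentences):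
--         is_subset = False
--         for j, sent2 in enumerate(all_sentences):
--             if i != j and sent1 in sent2 and len(sent1) < len(sent2):
--                 is_subset = True
--                 break
--         if not is_subset:
--             filtered_sentences.append(sent1)
--
--     # Limit to maximum sentences per document ratio
--     max_total_sentences = len(summaries) * max_sentences_per_doc
--     if len(filtered_sentences) > max_total_sentences:
--         filtered_sentences = filtered_sentences[:max_total_sentences]
--
--     return '. '.join(filtered_sentences) + '.'
-- ===== SOURCE B (Python) =====
-- from typing import List
--
-- def reduce_summary(summaries: List[str], max_sentences_per_doc: int = 4) -> str:
--     # Collect all sentences (same extraction as the original)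
--     all_sentences = []
--     for summary in summaries:
--         if summary:
--             all_sentences.extend(s.strip() for s in summary.split('.') if s.strip())
--
--     # A sentence is dropped iff it is a proper substring of some other sentence.
--     # Substring-of-a-longer-sentence is transitive, so it suffices to compare
--     # against the MAXIMAL sentences only: scan in order of decreasing length,
--     # keeping a list of maximal sentences seen so far and recording each
--     # sentence's verdict in a dict keyed by the sentence text.
--     maximal = []
--     verdict = {}
--     for s in sorted(all_sentences, key=len, reverse=True):
--         if any(len(t) > len(s) and s in t for t in maximal):
--             verdict[s] = True
--         else:
--             verdict[s] = False
--             maximal.append(s)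
--
--     filtered = [s for s in all_sentences if not verdict[s]]
--     # Unconditional slice: when the limit is >= len(filtered) it is a no-op,
--     # exactly like the original's guarded truncation.
--     filtered = filtered[:len(summaries) * max_sentences_per_doc]
--     return '. '.join(filtered) + '.'
-- ===== Notes on version B (the rewrite author's own statement) =====
-- stated objective: alternative
-- what changed: Replaces A's all-pairs enumerate scan (each sentence checked against every other) by a length-descending sorted pass that compares each sentence only against the maximal (non-subset) sentences kept so far, using transitivity of proper-substring, with verdicts stored in a dict and an unconditional truncating slice.
import Mathlib
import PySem

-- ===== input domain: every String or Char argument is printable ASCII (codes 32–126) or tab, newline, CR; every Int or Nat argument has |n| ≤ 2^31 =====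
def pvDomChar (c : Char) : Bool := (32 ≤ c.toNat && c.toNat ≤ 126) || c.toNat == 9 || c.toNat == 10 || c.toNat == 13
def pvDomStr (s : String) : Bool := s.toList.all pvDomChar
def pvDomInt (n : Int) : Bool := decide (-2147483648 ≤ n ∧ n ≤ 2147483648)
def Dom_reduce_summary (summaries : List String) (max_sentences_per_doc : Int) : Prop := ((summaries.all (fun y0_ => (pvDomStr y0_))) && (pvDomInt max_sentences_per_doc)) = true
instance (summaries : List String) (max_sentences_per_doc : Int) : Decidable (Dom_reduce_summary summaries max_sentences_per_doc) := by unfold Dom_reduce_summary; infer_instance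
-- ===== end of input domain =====

-- B replaces A's all-pairs proper-substring scan by a sort-by-length-descending pass that
-- compares each sentence only against the maximal sentences kept so far (substring-of-longer
-- is transitive), recording verdicts in a dict; same return value, alternative algorithm.

-- ===== PORT A =====
def reduce_summary (summaries : List String) (max_sentences_per_doc : Int) : String :=
  -- all_sentences: for summary in summaries: if summary: extend stripped non-empty '.'-pieces
  let all_sentences : List String := summaries.foldl (fun acc summary =>
    if summary.toList ≠ [] then
      acc ++ (((PySem.Str.split? summary ".").getD []).map PySem.Str.strip).filter
        (fun s => s.toList ≠ [])
    else acc) []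
  -- nested enumerate scan: sent1 dropped iff some other sentence strictly longer contains it
  let idx := PySem.List.enumerate all_sentences
  let filtered : List String := idx.foldl (fun acc p =>
    let is_subset := idx.any (fun q =>
      decide (p.1 ≠ q.1) && PySem.Str.isIn p.2 q.2 &&
      decide (PySem.Str.len p.2 < PySem.Str.len q.2))
    if is_subset then acc else acc ++ [p.2]) []
  let max_total : Int := (summaries.length : Int) * max_sentences_per_doc
  let filtered := if decide (max_total < (filtered.length : Int)) then
      PySem.List.slice filtered none (some max_total)
    else filtered
  PySem.Str.join ". " filtered ++ "."

-- ===== PORT B =====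
def reduce_summary_alt (summaries : List String) (max_sentences_per_doc : Int) : String :=
  let all_sentences : List String := summaries.foldl (fun acc summary =>
    if summary.toList ≠ [] then
      acc ++ (((PySem.Str.split? summary ".").getD []).map PySem.Str.strip).filter
        (fun s => s.toList ≠ [])
    else acc) []
  -- scan in order of decreasing length; st = (maximal, verdict)
  let st := (PySem.List.sorted all_sentences PySem.Str.len true).foldl
    (fun (st : List String × PySem.Dict String Bool) s =>
      if st.1.any (fun t => decide (PySem.Str.len s < PySem.Str.len t) && PySem.Str.isIn s t) then
        (st.1, st.2.insert s true)
      else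
        (st.1 ++ [s], st.2.insert s false))
    ([], PySem.Dict.empty)
  let filtered : List String := all_sentences.filter (fun s => !(st.2.getD s false))
  -- unconditional truncation (a no-op when the limit is at least the length)
  let filtered := PySem.List.slice filtered none
    (some ((summaries.length : Int) * max_sentences_per_doc))
  PySem.Str.join ". " filtered ++ "."

-- ===== PRECONDITION & SPEC =====
def Spec_reduce_summary (summaries : List String) (max_sentences_per_doc : Int) (out : String) : Prop := out = reduce_summary_alt summaries max_sentences_per_doc
instance (summaries : List String) (max_sentences_per_doc : Int) (out : String) : Decidable (Spec_reduce_summary summaries max_sentences_per_doc out) := by unfold Spec_reduce_summary; infer_instance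

-- ===== CLAIM (what is proved, stated in full; the proofs are below) =====
def Claim_equal_reduce_summary : Prop := ∀ (summaries : List String) (max_sentences_per_doc : Int), Dom_reduce_summary summaries max_sentences_per_doc → Spec_reduce_summary summaries max_sentences_per_doc (reduce_summary summaries max_sentences_per_doc)

-- ===== LEMMAS AND PROOFS =====

-- "s is a proper substring of some sentence in the pool" (B's drop condition over the whole pool)
def pvSubAll (all : List String) (s : String) : Bool :=
  all.any (fun t => decide (PySem.Str.len s < PySem.Str.len t) && PySem.Str.isIn s t)

lemma pvSubAll_trans_mem {all : List String} {s m : String}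
    (hm : m ∈ all) (hinf : s.toList <:+: m.toList) (hlt : s.toList.length < m.toList.length) :
    pvSubAll all s = true := by
  simp only [pvSubAll, List.any_eq_true]
  exact ⟨m, hm, by
    simp only [Bool.and_eq_true, decide_eq_true_eq, PySem.Str.isIn_iff_infix, PySem.Str.len_eq]
    exact ⟨by exact_mod_cast hlt, hinf⟩⟩

-- enumerate facts (proved here; PySem only exposes enumerate_cons)
lemma pv_mem_enumerate {α : Type} (xs : List α) :
    ∀ (k : Int) (p : Int × α), p ∈ PySem.List.enumerate xs k → p.2 ∈ xs ∧ k ≤ p.1 := by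
  induction xs with
  | nil => intro k p h; simp [PySem.List.enumerate] at h
  | cons x t ih =>
    intro k p h
    rw [PySem.List.enumerate_cons, List.mem_cons] at h
    rcases h with h | h
    · simp [h]
    · rcases ih (k + 1) p h with ⟨h1, h2⟩
      exact ⟨List.mem_cons_of_mem _ h1, by omega⟩

lemma pv_enumerate_exists {α : Type} (xs : List α) :
    ∀ (k : Int) (t : α), t ∈ xs → ∃ j, (j, t) ∈ PySem.List.enumerate xs k := by
  induction xs with
  | nil => intro k t h; simp at h
  | cons x tl ih =>
    intro k t h
    rw [PySem.List.enumerate_cons]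
    rw [List.mem_cons] at h
    rcases h with h | h
    · exact ⟨k, by simp [h]⟩
    · rcases ih (k + 1) t h with ⟨j, hj⟩
      exact ⟨j, List.mem_cons_of_mem _ hj⟩

lemma pv_enumerate_inj {α : Type} (xs : List α) :
    ∀ (k i : Int) (s t : α), (i, s) ∈ PySem.List.enumerate xs k →
      (i, t) ∈ PySem.List.enumerate xs k → s = t := by
  induction xs with
  | nil => intro k i s t hs _; simp [PySem.List.enumerate] at hs
  | cons x tl ih =>
    intro k i s t hs ht
    rw [PySem.List.enumerate_cons, List.mem_cons] at hs ht
    rcases hs with hs | hs <;> rcases ht with ht | ht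
    · rw [Prod.mk.injEq] at hs ht; rw [hs.2, ht.2]
    · have := (pv_mem_enumerate tl (k + 1) (i, t) ht).2
      rw [Prod.mk.injEq] at hs; simp at this ⊢; omega
    · have := (pv_mem_enumerate tl (k + 1) (i, s) hs).2
      rw [Prod.mk.injEq] at ht; simp at this ⊢; omega
    · exact ih (k + 1) i s t hs ht

lemma pv_enumerate_filter_map_snd {α : Type} (xs : List α) (g : α → Bool) :
    ∀ (k : Int),
    ((PySem.List.enumerate xs k).filter (fun p => g p.2)).map Prod.snd = xs.filter g := by
  induction xs with
  | nil => intro k; simp [PySem.List.enumerate]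
  | cons x t ih =>
    intro k
    rw [PySem.List.enumerate_cons]
    by_cases h : g x = true <;> simp [h, ih]

-- A's inner any over enumerate equals pvSubAll (the i ≠ j guard is redundant when lengths differ)
lemma pv_isSubset_eq {all : List String} {i : Int} {s : String}
    (hmem : (i, s) ∈ PySem.List.enumerate all 0) :
    ((PySem.List.enumerate all 0).any (fun q =>
      decide (i ≠ q.1) && PySem.Str.isIn s q.2 &&
      decide (PySem.Str.len s < PySem.Str.len q.2))) = pvSubAll all s := by
  rw [Bool.eq_iff_iff]
  simp only [pvSubAll, List.any_eq_true, Bool.and_eq_true, decide_eq_true_eq]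
  constructor
  · rintro ⟨q, hq, ⟨_, hin⟩, hlen⟩
    exact ⟨q.2, (pv_mem_enumerate all 0 q hq).1, hlen, hin⟩
  · rintro ⟨t, ht, hlen, hin⟩
    rcases pv_enumerate_exists all 0 t ht with ⟨j, hj⟩
    refine ⟨(j, t), hj, ⟨?_, hin⟩, hlen⟩
    intro hij
    subst hij
    have := pv_enumerate_inj all 0 i s t hmem hj
    subst this
    simp at hlen

-- A's filtered list
lemma pv_foldl_if_snd {α β : Type} (c : β × α → Bool) :
    ∀ (l : List (β × α)) (acc : List α),
    l.foldl (fun acc p => if c p then acc else acc ++ [p.2]) acc =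
      acc ++ (l.filter (fun p => !c p)).map Prod.snd := by
  intro l
  induction l with
  | nil => intro acc; simp
  | cons p l ih =>
    intro acc
    rw [List.foldl_cons]
    cases hc : c p <;> simp [hc, ih, List.append_assoc]

lemma pv_filteredA (all : List String) :
    (PySem.List.enumerate all 0).foldl (fun acc p =>
      if (PySem.List.enumerate all 0).any (fun q =>
        decide (p.1 ≠ q.1) && PySem.Str.isIn p.2 q.2 &&
        decide (PySem.Str.len p.2 < PySem.Str.len q.2)) then acc else acc ++ [p.2]) [] =
    all.filter (fun s => !(pvSubAll all s)) := by
  rw [pv_foldl_if_snd (fun p => (PySem.List.enumerate all 0).any (fun q =>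
        decide (p.1 ≠ q.1) && PySem.Str.isIn p.2 q.2 &&
        decide (PySem.Str.len p.2 < PySem.Str.len q.2)))]
  rw [List.filter_congr (q := fun p => !(pvSubAll all p.2))
    (fun p hp => by rw [Bool.not_inj_iff, pv_isSubset_eq (i := p.1) (s := p.2) (by simpa using hp)])]
  simpa using pv_enumerate_filter_map_snd all (fun s => !(pvSubAll all s)) 0

-- B's loop step
def pvStep (st : List String × PySem.Dict String Bool) (s : String) :
    List String × PySem.Dict String Bool :=
  if st.1.any (fun t => decide (PySem.Str.len s < PySem.Str.len t) && PySem.Str.isIn s t) then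
    (st.1, st.2.insert s true)
  else
    (st.1 ++ [s], st.2.insert s false)

-- loop invariant for B's fold over the length-descending list
lemma pv_loop_inv (all : List String) :
    ∀ (rest pfx : List String) (M : List String) (V : PySem.Dict String Bool),
    PySem.List.sorted all PySem.Str.len true = pfx ++ rest →
    (∀ m ∈ M, m ∈ all) →
    (∀ t ∈ pfx, ∃ m ∈ M, t.toList <:+: m.toList ∧ t.toList.length ≤ m.toList.length) →
    (∀ s ∈ pfx, V.getD s false = pvSubAll all s) →
    ∀ s ∈ pfx ++ rest, ((rest.foldl pvStep (M, V)).2).getD s false = pvSubAll all s := by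
  intro rest
  induction rest with
  | nil =>
    intro pfx M V _ _ _ hV s hs
    rw [List.foldl_nil]
    exact hV s (by simpa using hs)
  | cons x0 rest ih =>
    intro pfx M V hsort hM hcov hV s hs
    have hxmem : x0 ∈ all := by
      have hx : x0 ∈ PySem.List.sorted all PySem.Str.len true := by
        rw [hsort]; simp
      exact ((PySem.List.sorted_perm all PySem.Str.len true).mem_iff).1 hx
    -- the computed verdict for x0 equals pvSubAll all x0
    have hb : (M.any (fun t => decide (PySem.Str.len x0 < PySem.Str.len t) && PySem.Str.isIn x0 t))
        = pvSubAll all x0 := by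
      rw [Bool.eq_iff_iff]
      constructor
      · intro h
        rw [List.any_eq_true] at h
        obtain ⟨m, hmM, hcond⟩ := h
        simp only [Bool.and_eq_true, decide_eq_true_eq, PySem.Str.isIn_iff_infix,
          PySem.Str.len_eq] at hcond
        exact pvSubAll_trans_mem (hM m hmM) hcond.2 (by exact_mod_cast hcond.1)
      · intro h
        simp only [pvSubAll, List.any_eq_true, Bool.and_eq_true, decide_eq_true_eq,
          PySem.Str.isIn_iff_infix, PySem.Str.len_eq] at h
        obtain ⟨t, htall, hlt, hinf⟩ := h
        have htsorted : t ∈ pfx ++ x0 :: rest := by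
          rw [← hsort]
          exact ((PySem.List.sorted_perm all PySem.Str.len true).mem_iff).2 htall
        have hpair := PySem.List.sorted_pairwise_rev all PySem.Str.len
        rw [hsort] at hpair
        have htpfx : t ∈ pfx := by
          rcases List.mem_append.1 htsorted with h1 | h1
          · exact h1
          · exfalso
            rcases List.mem_cons.1 h1 with h2 | h2
            · rw [h2] at hlt; omega
            · have hxr := (List.pairwise_cons.1 (List.pairwise_append.1 hpair).2.1).1 t h2
              simp only [PySem.Str.len_eq] at hxr
              omega
        obtain ⟨m, hmM, hinf2, hlen2⟩ := hcov t htpfx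
        rw [List.any_eq_true]
        refine ⟨m, hmM, ?_⟩
        simp only [Bool.and_eq_true, decide_eq_true_eq, PySem.Str.isIn_iff_infix,
          PySem.Str.len_eq]
        constructor
        · exact_mod_cast lt_of_lt_of_le (by exact_mod_cast hlt) (by exact_mod_cast hlen2)
        · exact hinf.trans hinf2
    rw [List.foldl_cons]
    have hsort' : PySem.List.sorted all PySem.Str.len true = (pfx ++ [x0]) ++ rest := by
      rw [hsort]; simp
    have hs' : s ∈ (pfx ++ [x0]) ++ rest := by simpa using hs
    by_cases hbv : (M.any (fun t => decide (PySem.Str.len x0 < PySem.Str.len t) && PySem.Str.isIn x0 t)) = true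
    · have hstep : pvStep (M, V) x0 = (M, V.insert x0 true) := by
        simp only [pvStep, hbv, if_true]
      rw [hstep]
      refine ih (pfx ++ [x0]) M (V.insert x0 true) hsort' hM ?_ ?_ s hs'
      · intro t ht
        rcases List.mem_append.1 ht with h1 | h1
        · exact hcov t h1
        · obtain ⟨m, hmM, hcond⟩ := List.any_eq_true.1 hbv
          simp only [Bool.and_eq_true, decide_eq_true_eq, PySem.Str.isIn_iff_infix,
            PySem.Str.len_eq] at hcond
          rw [List.mem_singleton.1 h1]
          exact ⟨m, hmM, hcond.2, by have := hcond.1; omega⟩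
      · intro u hu
        by_cases hux : u = x0
        · subst hux
          rw [PySem.Dict.getD_insert_self, ← hb, hbv]
        · rw [PySem.Dict.getD_insert_of_ne _ _ _ hux]
          rcases List.mem_append.1 hu with h1 | h1
          · exact hV u h1
          · exact absurd (by simpa using h1) hux
    · have hbf : (M.any (fun t => decide (PySem.Str.len x0 < PySem.Str.len t) && PySem.Str.isIn x0 t)) = false :=
        by simpa using hbv
      have hstep : pvStep (M, V) x0 = (M ++ [x0], V.insert x0 false) := by
        simp only [pvStep, hbf, Bool.false_eq_true, if_false]
      rw [hstep]
      refine ih (pfx ++ [x0]) (M ++ [x0]) (V.insert x0 false) hsort' ?_ ?_ ?_ s hs'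
      · intro m hm
        rcases List.mem_append.1 hm with h1 | h1
        · exact hM m h1
        · rw [List.mem_singleton.1 h1]; exact hxmem
      · intro t ht
        rcases List.mem_append.1 ht with h1 | h1
        · obtain ⟨m, hmM, h2, h3⟩ := hcov t h1
          exact ⟨m, List.mem_append_left _ hmM, h2, h3⟩
        · rw [List.mem_singleton.1 h1]
          exact ⟨x0, List.mem_append_right _ (by simp), List.infix_refl _, le_refl _⟩
      · intro u hu
        by_cases hux : u = x0
        · subst hux
          rw [PySem.Dict.getD_insert_self, ← hb, hbf]
        · rw [PySem.Dict.getD_insert_of_ne _ _ _ hux]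
          rcases List.mem_append.1 hu with h1 | h1
          · exact hV u h1
          · exact absurd (by simpa using h1) hux

-- B's filtered list
lemma pv_filteredB (all : List String) :
    all.filter (fun s =>
      !(((PySem.List.sorted all PySem.Str.len true).foldl
          (fun (st : List String × PySem.Dict String Bool) s =>
            if st.1.any (fun t => decide (PySem.Str.len s < PySem.Str.len t) && PySem.Str.isIn s t) then
              (st.1, st.2.insert s true)
            else
              (st.1 ++ [s], st.2.insert s false))
          ([], PySem.Dict.empty)).2.getD s false)) =
    all.filter (fun s => !(pvSubAll all s)) := by
  apply List.filter_congr
  intro s hs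
  have hfold : (PySem.List.sorted all PySem.Str.len true).foldl
      (fun (st : List String × PySem.Dict String Bool) s =>
        if st.1.any (fun t => decide (PySem.Str.len s < PySem.Str.len t) && PySem.Str.isIn s t) then
          (st.1, st.2.insert s true)
        else
          (st.1 ++ [s], st.2.insert s false))
      ([], PySem.Dict.empty) =
      (PySem.List.sorted all PySem.Str.len true).foldl pvStep ([], PySem.Dict.empty) := rfl
  rw [hfold, pv_loop_inv all (PySem.List.sorted all PySem.Str.len true) [] [] PySem.Dict.empty
    rfl (by simp) (by simp) (by simp) s
    (by simpa using ((PySem.List.sorted_perm all PySem.Str.len true).mem_iff).2 hs)]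

-- the guarded truncation equals the unconditional slice
lemma pv_slice_eq (xs : List α) (m : Int) :
    (if decide (m < (xs.length : Int)) then PySem.List.slice xs none (some m) else xs) =
    PySem.List.slice xs none (some m) := by
  by_cases h : m < (xs.length : Int)
  · simp [h]
  · have h0 : 0 ≤ m := by omega
    rw [PySem.List.slice_to xs h0]
    simp only [h, decide_false, Bool.false_eq_true, if_false]
    rw [List.take_of_length_le (by omega)]

-- ===== VERDICT (by name: the statement is the Claim_ definition above) =====
theorem reduce_summary_spec : Claim_equal_reduce_summary := by
  intro summaries m _
  unfold Spec_reduce_summary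
  simp only [reduce_summary, reduce_summary_alt]
  rw [pv_slice_eq, pv_filteredA, pv_filteredB]
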